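-- pv_equiv track=rewrite | github.com/kravchenkog/qiio_api | fixture/data_helper.py | get_is_not_digit_values_from_list
-- ===== SOURCE A (Python) =====
-- def get_is_not_digit_values_from_list(li):
--     part1 = [x for x in li if x.isdigit() == False]
--     part2 = [x for x in li if x.isdigit() == True and int(x)]
--     if len(part2):
--         part1.extend(part2)
--         return part1
--     else:
--         return part1
-- ===== SOURCE B (Python) =====
-- def get_is_not_digit_values_from_list(li):
--     kept = [x for x in li if not x.isdigit() or int(x)]
--     return sorted(kept, key=lambda x: x.isdigit())
-- ===== Notes on version B (the rewrite author's own statement) =====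
-- stated objective: alternative
-- what changed: Instead of two filtering comprehensions concatenated, B drops zero digit-strings in one filter and then stably sorts the survivors by the boolean key isdigit, so the non-digits/digits grouping emerges from sort stability rather than from concatenating two scans.
import Mathlib
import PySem

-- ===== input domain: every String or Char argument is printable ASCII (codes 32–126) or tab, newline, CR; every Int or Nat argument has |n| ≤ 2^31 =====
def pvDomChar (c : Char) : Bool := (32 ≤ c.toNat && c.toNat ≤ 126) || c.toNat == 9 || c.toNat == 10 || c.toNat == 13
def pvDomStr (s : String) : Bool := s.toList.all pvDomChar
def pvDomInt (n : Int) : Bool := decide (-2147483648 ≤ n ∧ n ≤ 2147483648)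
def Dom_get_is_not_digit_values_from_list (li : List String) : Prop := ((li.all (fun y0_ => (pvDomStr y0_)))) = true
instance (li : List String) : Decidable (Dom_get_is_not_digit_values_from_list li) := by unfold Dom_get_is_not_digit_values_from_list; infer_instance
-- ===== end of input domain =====

-- B filters out zero digit-strings and stably sorts the rest by the boolean key isdigit (alternative algorithm); return values only.
-- ===== PORT A =====
def get_is_not_digit_values_from_list (li : List String) : List String :=
  let part1 := li.filter (fun x => PySem.Str.strIsdigit x == false)
  let part2 := li.filter (fun x => PySem.Str.strIsdigit x == true && ((PySem.Int.ofStr? x).getD 0 != 0))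
  if part2.length ≠ 0 then part1 ++ part2 else part1

-- ===== PORT B =====
def get_is_not_digit_values_from_list_alt (li : List String) : List String :=
  let kept := li.filter (fun x => !PySem.Str.strIsdigit x || ((PySem.Int.ofStr? x).getD 0 != 0))
  PySem.List.sorted kept (fun x => PySem.Str.strIsdigit x) false

-- ===== PRECONDITION & SPEC =====
def Spec_get_is_not_digit_values_from_list (li : List String) (out : List String) : Prop := out = get_is_not_digit_values_from_list_alt li
instance (li : List String) (out : List String) : Decidable (Spec_get_is_not_digit_values_from_list li out) := by unfold Spec_get_is_not_digit_values_from_list; infer_instance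

-- ===== CLAIM (what is proved, stated in full; the proofs are below) =====
def Claim_equal_get_is_not_digit_values_from_list : Prop := ∀ (li : List String), Dom_get_is_not_digit_values_from_list li → Spec_get_is_not_digit_values_from_list li (get_is_not_digit_values_from_list li)

-- ===== LEMMAS AND PROOFS =====

-- inserting a key-false element into (all-false F ++ all-true T) lands it at the end of F
theorem pv_insert_false (key : String → Bool) (x : String) (F T : List String)
    (hF : ∀ y ∈ F, key y = false) (hT : ∀ y ∈ T, key y = true) (hx : key x = false) :
    PySem.List.insertBy (fun a b => decide (key a < key b)) x (F ++ T) = (F ++ [x]) ++ T := by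
  induction F with
  | nil =>
    cases T with
    | nil => rfl
    | cons y ys =>
      have hy := hT y (by simp)
      simp [PySem.List.insertBy, hx, hy]
  | cons f fs ih =>
    have hf := hF f (by simp)
    simp only [List.cons_append, PySem.List.insertBy, hx, hf]
    simp [ih (fun y hy => hF y (by simp [hy]))]

-- inserting a key-true element into a list goes to the very end (no elements have a larger key)
theorem pv_insert_true (key : String → Bool) (x : String) (L : List String) (hx : key x = true) :
    PySem.List.insertBy (fun a b => decide (key a < key b)) x L = L ++ [x] := by
  apply PySem.List.insertBy_of_forall_not_before
  intro y _
  simp [hx]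

-- the stable insertion fold over any list splits into key-false elements then key-true elements
theorem pv_sorted_partition (key : String → Bool) (xs : List String) (F T : List String)
    (hF : ∀ y ∈ F, key y = false) (hT : ∀ y ∈ T, key y = true) :
    xs.foldl (fun acc x => PySem.List.insertBy (fun a b => decide (key a < key b)) x acc) (F ++ T)
      = (F ++ xs.filter (fun x => key x == false)) ++ (T ++ xs.filter (fun x => key x == true)) := by
  induction xs generalizing F T with
  | nil => simp
  | cons x xs ih =>
    simp only [List.foldl_cons, List.filter_cons]
    cases hx : key x with
    | false =>
      rw [pv_insert_false key x F T hF hT hx]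
      rw [ih (F ++ [x]) T (by intro y hy; rcases List.mem_append.1 hy with h | h
                              · exact hF y h
                              · simp at h; subst h; exact hx) hT]
      simp
    | true =>
      rw [pv_insert_true key x (F ++ T) hx, List.append_assoc]
      rw [ih F (T ++ [x]) hF (by intro y hy; rcases List.mem_append.1 hy with h | h
                                 · exact hT y h
                                 · simp at h; subst h; exact hx)]
      simp

-- ===== VERDICT (by name: the statement is the Claim_ definition above) =====
theorem get_is_not_digit_values_from_list_spec : Claim_equal_get_is_not_digit_values_from_list := by
  intro li _
  unfold Spec_get_is_not_digit_values_from_list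
  unfold get_is_not_digit_values_from_list get_is_not_digit_values_from_list_alt
  rw [PySem.List.sorted_eq_foldl_insertBy]
  rw [show ([] : List String) = ([] ++ [] : List String) from rfl,
      pv_sorted_partition (fun x => PySem.Str.strIsdigit x) _ [] [] (by simp) (by simp)]
  simp only [List.nil_append, List.filter_filter]
  have h1 : (li.filter fun x =>
        (PySem.Str.strIsdigit x == false) && (!PySem.Str.strIsdigit x || ((PySem.Int.ofStr? x).getD 0 != 0)))
      = li.filter (fun x => PySem.Str.strIsdigit x == false) := by
    apply List.filter_congr
    intro x _
    cases h : PySem.Str.strIsdigit x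
    · simp
    · simp
  have h2 : (li.filter fun x =>
        (PySem.Str.strIsdigit x == true) && (!PySem.Str.strIsdigit x || ((PySem.Int.ofStr? x).getD 0 != 0)))
      = li.filter (fun x => PySem.Str.strIsdigit x == true && ((PySem.Int.ofStr? x).getD 0 != 0)) := by
    apply List.filter_congr
    intro x _
    cases h : PySem.Str.strIsdigit x
    · simp
    · simp
  rw [h1, h2]
  split
  · rfl
  · next h =>
    have hnil : li.filter (fun x => PySem.Str.strIsdigit x == true && ((PySem.Int.ofStr? x).getD 0 != 0)) = [] :=
      List.length_eq_zero_iff.1 (by omega)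
    rw [hnil, List.append_nil]
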